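-- pv_equiv track=rewrite | github.com/Toney823/YXK_Usefull_Tools | Gff3Renamer.py | block_cacher
-- ===== SOURCE A (Python) =====
-- def block_cacher(lines: list, separator_first: str):
--     file_blocks = []
--     block = []
--     for line in lines:
--         if len(line) == 0:
--             continue
--         if line[0] == separator_first:
--             if len(block) > 0:
--                 file_blocks.append(block)
--             block = []
--             block.append(line)
--             continue
--         block.append(line)
--     if len(block) > 0:
--         file_blocks.append(block)
--     return file_blocks
-- ===== SOURCE B (Python) =====
-- def block_cacher(lines: list, separator_first: str):
--     # staged decomposition: drop empty lines, then cut the cleaned list into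
--     # spans at separator-headed lines (leading span first, if any)
--     xs = [l for l in lines if l]
--     n = len(xs)
--     blocks = []
--     j = 0
--     while j < n and xs[j][0] != separator_first:
--         j += 1
--     if j > 0:
--         blocks.append(xs[:j])
--     i = j
--     while i < n:
--         j = i + 1
--         while j < n and xs[j][0] != separator_first:
--             j += 1
--         blocks.append(xs[i:j])
--         i = j
--     return blocks
-- ===== Notes on version B (the rewrite author's own statement) =====
-- stated objective: alternative
-- what changed: B works in stages: it first filters out empty lines, then cuts the cleaned list into contiguous spans (a leading span of non-separator lines, then one span per separator-headed line) using scan-and-slice, instead of A's single pass that appends into an open block and flushes it at each separator and at the end.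
import Mathlib
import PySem

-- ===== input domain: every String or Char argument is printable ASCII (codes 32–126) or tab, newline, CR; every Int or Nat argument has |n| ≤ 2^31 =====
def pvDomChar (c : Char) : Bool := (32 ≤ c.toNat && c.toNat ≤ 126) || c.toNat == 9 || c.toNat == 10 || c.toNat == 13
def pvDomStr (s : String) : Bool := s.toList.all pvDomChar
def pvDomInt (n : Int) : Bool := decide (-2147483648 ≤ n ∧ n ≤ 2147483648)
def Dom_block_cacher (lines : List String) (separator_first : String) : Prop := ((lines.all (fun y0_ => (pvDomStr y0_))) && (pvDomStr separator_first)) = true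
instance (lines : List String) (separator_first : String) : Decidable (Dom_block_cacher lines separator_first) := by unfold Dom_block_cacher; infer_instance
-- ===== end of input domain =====

-- B filters out empty lines first and then cuts the cleaned list into spans at separator-headed lines (scan-and-slice), instead of A's single append-and-flush fold; same O(n) cost.


-- ===== PORT A =====
-- A's loop body, state (file_blocks, block); 'line[0]' is safe because the empty line is skipped first
def stepA (sep : String) (st : List (List String) × List String) (line : String) : List (List String) × List String :=
  match line.toList with
  | [] => st
  | c :: _ =>
    if String.mk [c] = sep then
      ((if st.2.length > 0 then st.1 ++ [st.2] else st.1), [line])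
    else
      (st.1, st.2 ++ [line])

def block_cacher (lines : List String) (separator_first : String) : List (List String) :=
  let st := lines.foldl (stepA separator_first) ([], [])
  if st.2.length > 0 then st.1 ++ [st.2] else st.1

-- ===== PORT B =====
-- the inner scan 'while j < n and xs[j][0] != separator_first: j += 1' with the slice it delimits:
-- returns (the span of non-separator lines, the remainder starting at the separator line)
def spanTo (sep : String) : List String → List String × List String
  | [] => ([], [])
  | l :: rest =>
    match l.toList with
    | [] => let p := spanTo sep rest; (l :: p.1, p.2)   -- unreachable: empty lines were filtered out
    | c :: _ =>
      if String.mk [c] = sep then ([], l :: rest)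
      else let p := spanTo sep rest; (l :: p.1, p.2)

lemma spanTo_snd_length_le (sep : String) : ∀ xs : List String, (spanTo sep xs).2.length ≤ xs.length := by
  intro xs
  induction xs with
  | nil => simp [spanTo]
  | cons l rest ih =>
    simp only [spanTo]
    cases l.toList with
    | nil => exact le_trans ih (Nat.le_succ _)
    | cons c cs =>
      by_cases h : String.mk [c] = sep
      · simp [h]
      · simp only [if_neg h]; exact le_trans ih (Nat.le_succ _)

-- B's outer while loop: each block is a separator-headed line plus its span of followers
def cutBlocks (sep : String) : List String → List (List String)
  | [] => []
  | l :: rest =>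
    let p := spanTo sep rest
    (l :: p.1) :: cutBlocks sep p.2
termination_by xs => xs.length
decreasing_by
  simpa using Nat.lt_succ_of_le (spanTo_snd_length_le sep rest)

def block_cacher_alt (lines : List String) (separator_first : String) : List (List String) :=
  let xs := lines.filter (fun l => !l.toList.isEmpty)
  let p := spanTo separator_first xs
  (if p.1.isEmpty then [] else [p.1]) ++ cutBlocks separator_first p.2

-- ===== PRECONDITION & SPEC =====
def Spec_block_cacher (lines : List String) (separator_first : String) (out : List (List String)) : Prop := out = block_cacher_alt lines separator_first
instance (lines : List String) (separator_first : String) (out : List (List String)) : Decidable (Spec_block_cacher lines separator_first out) := by unfold Spec_block_cacher; infer_instance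

-- ===== CLAIM (what is proved, stated in full; the proofs are below) =====
def Claim_equal_block_cacher : Prop := ∀ (lines : List String) (separator_first : String), Dom_block_cacher lines separator_first → Spec_block_cacher lines separator_first (block_cacher lines separator_first)

-- ===== LEMMAS AND PROOFS =====

-- A's finalizer
def finA (st : List (List String) × List String) : List (List String) :=
  if st.2.length > 0 then st.1 ++ [st.2] else st.1

-- A's fold skips empty lines, so it equals the fold over the filtered list
lemma foldl_stepA_filter (sep : String) : ∀ (ls : List String) (st : List (List String) × List String),
    ls.foldl (stepA sep) st = (ls.filter (fun l => !l.toList.isEmpty)).foldl (stepA sep) st := by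
  intro ls
  induction ls with
  | nil => intro st; simp
  | cons l rest ih =>
    intro st
    cases hl : l.toList with
    | nil => simp [List.filter_cons, hl, stepA, ih]
    | cons c cs => simp [List.filter_cons, hl, stepA, ih]

-- Invariant: A's fold from (bs, b) over a list of non-empty lines, finalized, equals
-- bs, then b glued to the leading span, then the separator-cut blocks of the remainder.
lemma key (sep : String) : ∀ (xs : List String) (bs : List (List String)) (b : List String),
    (∀ l ∈ xs, l.toList ≠ []) →
    finA (xs.foldl (stepA sep) (bs, b)) =
      bs ++ (if b ++ (spanTo sep xs).1 = [] then [] else [b ++ (spanTo sep xs).1])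
         ++ cutBlocks sep (spanTo sep xs).2 := by
  intro xs
  induction xs with
  | nil =>
    intro bs b _
    simp only [List.foldl_nil, spanTo, finA, cutBlocks, List.append_nil]
    by_cases h : b = [] <;> simp [h, List.length_pos_iff]
  | cons l rest ih =>
    intro bs b hne
    have hl : l.toList ≠ [] := hne l (List.mem_cons_self ..)
    have hrest : ∀ x ∈ rest, x.toList ≠ [] := fun x hx => hne x (List.mem_cons_of_mem _ hx)
    cases hlc : l.toList with
    | nil => exact absurd hlc hl
    | cons c cs =>
      by_cases hsep : String.mk [c] = sep
      · simp only [List.foldl_cons, stepA, hlc, if_pos hsep]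
        rw [ih _ _ hrest]
        simp only [spanTo, hlc, if_pos hsep, cutBlocks]
        by_cases hb : b = []
        · simp [hb]
        · simp [hb, List.length_pos_iff, List.append_assoc]
      · simp only [List.foldl_cons, stepA, hlc, if_neg hsep]
        rw [ih _ _ hrest]
        simp only [spanTo, hlc, if_neg hsep]
        simp [List.append_assoc]

-- ===== VERDICT (by name: the statement is the Claim_ definition above) =====
theorem block_cacher_spec : Claim_equal_block_cacher := by
  intro lines sep _
  show block_cacher lines sep = block_cacher_alt lines sep
  have hne : ∀ l ∈ lines.filter (fun l => !l.toList.isEmpty), l.toList ≠ [] := by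
    intro l hl
    have := (List.mem_filter.mp hl).2
    simpa [List.isEmpty_iff] using this
  have h := key sep (lines.filter (fun l => !l.toList.isEmpty)) [] [] hne
  simp only [block_cacher, foldl_stepA_filter sep lines, finA] at *
  rw [h]
  simp [block_cacher_alt, List.isEmpty_iff]
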